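-- pv_equiv track=rewrite | github.com/Zhenqi-Li/Artificial-Intelligance-Project | AI_agent.py | Score_calculation
-- ===== SOURCE A (Python) =====
-- Score_evaluation_list = [(50, (0, 1, 1, 0, 0)),
--                (50, (0, 0, 1, 1, 0)),
--                (200, (1, 1, 0, 1, 0)),
--                (500, (0, 0, 1, 1, 1)),
--                (500, (1, 1, 1, 0, 0)),
--                (5000, (0, 1, 1, 1, 0)),
--                (5000, (0, 1, 0, 1, 1, 0)),
--                (5000, (0, 1, 1, 0, 1, 0)),
--                (5000, (1, 1, 1, 0, 1)),
--                (5000, (1, 1, 0, 1, 1)),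
--                (5000, (1, 0, 1, 1, 1)),
--                (5000, (1, 1, 1, 1, 0)),
--                (5000, (0, 1, 1, 1, 1)),
--                (50000, (0, 1, 1, 1, 1, 0)),
--                (99999999, (1, 1, 1, 1, 1))]
--
-- def Score_calculation(m, n, x_direction, y_direction, enemy_list, my_list, score_all_arr):
--     add_score = 0  # add_score
--     # choose the biggest score in one direction
--     max_score_shape = (0, None)
--     # if there is a score shape in the direction, then don't calculate again.
--     for item in score_all_arr:
--         for pt in item[1]:
--             if m == pt[0] and n == pt[1] and x_direction == item[2][0] and y_direction == item[2][1]: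
--                 return 0
--
--     # literate left and right of the last step to search score shape
--     for offset in range(-5, 1):
--         # offset = -2
--         pos = []
--         for i in range(0, 6):
--             if (m + (i + offset) * x_direction, n + (i + offset) * y_direction) in enemy_list:
--                 pos.append(2)
--             elif (m + (i + offset) * x_direction, n + (i + offset) * y_direction) in my_list:
--                 pos.append(1)
--             else:
--                 pos.append(0)
--         tmp_shap5 = (pos[0], pos[1], pos[2], pos[3], pos[4])
--         tmp_shap6 = (pos[0], pos[1], pos[2], pos[3], pos[4], pos[5])
--
--         for (score, shape) in Score_evaluation_list:
--             if tmp_shap5 == shape or tmp_shap6 == shape: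
--                 if score > max_score_shape[0]:
--                     max_score_shape = (score, ((m + (0+offset) * x_direction, n + (0+offset) * y_direction),
--                                                (m + (1+offset) * x_direction, n + (1+offset) * y_direction),
--                                                (m + (2+offset) * x_direction, n + (2+offset) * y_direction),
--                                                (m + (3+offset) * x_direction, n + (3+offset) * y_direction),
--                                                (m + (4+offset) * x_direction, n + (4+offset) * y_direction)), (x_direction, y_direction))
--
--     #calculate the intersection, if two live three intersect, increase score
--     if max_score_shape[1] is not None:
--         for item in score_all_arr:
--             for pt1 in item[1]:
--                 for pt2 in max_score_shape[1]:
--                     if pt1 == pt2 and max_score_shape[0] > 10 and item[0] > 10: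
--                         add_score += item[0] + max_score_shape[0]
--
--         score_all_arr.append(max_score_shape)
--
--     return add_score + max_score_shape[0]
-- ===== SOURCE B (Python) =====
-- Score_evaluation_list = [(50, (0, 1, 1, 0, 0)),
--                (50, (0, 0, 1, 1, 0)),
--                (200, (1, 1, 0, 1, 0)),
--                (500, (0, 0, 1, 1, 1)),
--                (500, (1, 1, 1, 0, 0)),
--                (5000, (0, 1, 1, 1, 0)),
--                (5000, (0, 1, 0, 1, 1, 0)),
--                (5000, (0, 1, 1, 0, 1, 0)),
--                (5000, (1, 1, 1, 0, 1)),
--                (5000, (1, 1, 0, 1, 1)),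
--                (5000, (1, 0, 1, 1, 1)),
--                (5000, (1, 1, 1, 1, 0)),
--                (5000, (0, 1, 1, 1, 1)),
--                (50000, (0, 1, 1, 1, 1, 0)),
--                (99999999, (1, 1, 1, 1, 1))]
--
--
-- def _cell(m, n, xd, yd, enemy_list, my_list, k):
--     p = (m + k * xd, n + k * yd)
--     return 2 if p in enemy_list else (1 if p in my_list else 0)
--
--
-- def _first_match(line, w):
--     # leftmost window start 0..5 where the shape w occurs on the line
--     for p in range(6):
--         if line[p:p + len(w)] == w:
--             return p
--     return None
--
--
-- def _points(m, n, xd, yd, p):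
--     off = p - 5
--     return tuple((m + (j + off) * xd, n + (j + off) * yd) for j in range(5))
--
--
-- def Score_calculation(m, n, x_direction, y_direction, enemy_list, my_list, score_all_arr):
--     # already scored through (m, n) in this direction? then nothing to add
--     for item in score_all_arr:
--         for pt in item[1]:
--             if m == pt[0] and n == pt[1] and x_direction == item[2][0] and y_direction == item[2][1]:
--                 return 0
--
--     # the 11-cell line of codes along the direction (one membership test per cell)
--     line = [_cell(m, n, x_direction, y_direction, enemy_list, my_list, k) for k in range(-5, 6)]
--
--     # pattern-major search: leftmost occurrence of each table shape on the line
--     candidates = []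
--     for score, shape in Score_evaluation_list:
--         p = _first_match(line, list(shape))
--         if p is not None:
--             candidates.append((score, p))
--
--     if not candidates:
--         return 0
--
--     # highest score wins; among equal scores the leftmost start wins
--     best_score = max(s for s, _ in candidates)
--     best_p = min(p for s, p in candidates if s == best_score)
--     pts = _points(m, n, x_direction, y_direction, best_p)
--
--     # intersection bonus, multiplicity via count
--     add_score = 0
--     if best_score > 10:
--         for item in score_all_arr:
--             if item[0] > 10:
--                 for pt1 in item[1]:
--                     add_score += (item[0] + best_score) * pts.count(pt1)
--     score_all_arr.append((best_score, pts, (x_direction, y_direction)))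
--     return add_score + best_score
-- ===== Notes on version B (the rewrite author's own statement) =====
-- stated objective: alternative
-- what changed: B is pattern-major instead of offset-major: it builds the 11-cell line once, computes for each table shape its leftmost occurrence on the line (a candidate list), then selects the result by max score with min-start tie-break, and computes the intersection bonus with per-point counts, instead of A's offset-by-offset sliding window with a running strictly-greater max and a triple nested bonus loop.
import Mathlib
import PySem

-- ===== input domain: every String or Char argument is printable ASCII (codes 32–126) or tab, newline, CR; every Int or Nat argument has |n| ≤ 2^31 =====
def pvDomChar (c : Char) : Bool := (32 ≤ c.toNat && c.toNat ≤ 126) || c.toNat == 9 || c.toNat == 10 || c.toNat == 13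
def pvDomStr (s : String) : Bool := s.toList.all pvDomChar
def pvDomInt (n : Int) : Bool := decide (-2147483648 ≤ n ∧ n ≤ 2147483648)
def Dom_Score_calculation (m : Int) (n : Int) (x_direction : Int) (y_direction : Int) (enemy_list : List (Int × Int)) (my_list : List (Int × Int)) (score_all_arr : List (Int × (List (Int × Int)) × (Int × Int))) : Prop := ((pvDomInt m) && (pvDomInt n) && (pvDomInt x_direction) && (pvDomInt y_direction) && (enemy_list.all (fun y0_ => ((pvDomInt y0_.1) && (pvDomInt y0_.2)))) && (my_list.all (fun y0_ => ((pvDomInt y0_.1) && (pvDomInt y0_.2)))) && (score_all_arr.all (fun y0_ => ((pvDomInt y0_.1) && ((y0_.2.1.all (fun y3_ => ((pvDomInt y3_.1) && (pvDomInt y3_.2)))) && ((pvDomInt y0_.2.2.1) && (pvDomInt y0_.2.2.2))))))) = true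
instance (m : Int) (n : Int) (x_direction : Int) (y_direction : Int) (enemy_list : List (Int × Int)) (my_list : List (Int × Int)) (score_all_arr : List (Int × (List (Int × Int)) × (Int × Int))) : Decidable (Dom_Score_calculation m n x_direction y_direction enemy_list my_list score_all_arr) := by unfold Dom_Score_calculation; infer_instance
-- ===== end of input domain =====

-- B replaces A's offset-major sliding-window scan by a pattern-major search: it builds the
-- 11-cell line once, finds each table shape's leftmost occurrence, and selects the winner by
-- max score / min start; the intersection bonus uses counts. Equivalence is about the RETURN
-- value (both versions also perform the same score_all_arr.append in Python).


-- ===== PORT A =====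
-- Score_evaluation_list (shapes as lists; a 5-tuple never equals a 6-tuple, as in Python)
def sevalList : List (Int × List Int) :=
  [(50, [0, 1, 1, 0, 0]),
   (50, [0, 0, 1, 1, 0]),
   (200, [1, 1, 0, 1, 0]),
   (500, [0, 0, 1, 1, 1]),
   (500, [1, 1, 1, 0, 0]),
   (5000, [0, 1, 1, 1, 0]),
   (5000, [0, 1, 0, 1, 1, 0]),
   (5000, [0, 1, 1, 0, 1, 0]),
   (5000, [1, 1, 1, 0, 1]),
   (5000, [1, 1, 0, 1, 1]),
   (5000, [1, 0, 1, 1, 1]),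
   (5000, [1, 1, 1, 1, 0]),
   (5000, [0, 1, 1, 1, 1]),
   (50000, [0, 1, 1, 1, 1, 0]),
   (99999999, [1, 1, 1, 1, 1])]

-- body of A's `for offset in range(-5, 1)` loop
def stepA (m n xd yd : Int) (enemy my : List (Int × Int))
    (ms : Int × Option (List (Int × Int))) (offset : Int) : Int × Option (List (Int × Int)) :=
  let pos := (PySem.List.pyRange 0 6 1).foldl (fun pos i =>
    pos ++ [if enemy.contains (m + (i + offset) * xd, n + (i + offset) * yd) then (2 : Int)
            else if my.contains (m + (i + offset) * xd, n + (i + offset) * yd) then 1 else 0]) []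
  let tmp_shap5 := pos.take 5   -- (pos[0], …, pos[4]); pos has exactly 6 elements
  let tmp_shap6 := pos
  sevalList.foldl (fun ms sc =>
    if (tmp_shap5 == sc.2 || tmp_shap6 == sc.2) && sc.1 > ms.1 then
      (sc.1, some [(m + (0 + offset) * xd, n + (0 + offset) * yd),
                   (m + (1 + offset) * xd, n + (1 + offset) * yd),
                   (m + (2 + offset) * xd, n + (2 + offset) * yd),
                   (m + (3 + offset) * xd, n + (3 + offset) * yd),
                   (m + (4 + offset) * xd, n + (4 + offset) * yd)])
    else ms) ms

def Score_calculation (m : Int) (n : Int) (x_direction : Int) (y_direction : Int) (enemy_list : List (Int × Int)) (my_list : List (Int × Int)) (score_all_arr : List (Int × (List (Int × Int)) × (Int × Int))) : Int :=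
  -- early-return scan: if there is already a score shape through (m,n) in this direction
  if score_all_arr.any (fun item => item.2.1.any (fun pt =>
       m == pt.1 && n == pt.2 && x_direction == item.2.2.1 && y_direction == item.2.2.2)) then 0
  else
    let msd := (PySem.List.pyRange (-5) 1 1).foldl
      (stepA m n x_direction y_direction enemy_list my_list) ((0 : Int), none)
    match msd with
    | (s, none) => 0 + s          -- add_score stays 0
    | (s, some pts) =>
      let add_score := score_all_arr.foldl (fun acc item =>
        item.2.1.foldl (fun acc pt1 =>
          pts.foldl (fun acc pt2 =>
            if pt1 == pt2 && s > 10 && item.1 > 10 then acc + item.1 + s else acc) acc) acc) 0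
      add_score + s

-- ===== PORT B =====
-- _cell: code of the cell k steps along the direction
def bCell (m n xd yd : Int) (enemy my : List (Int × Int)) (k : Int) : Int :=
  if enemy.contains (m + k * xd, n + k * yd) then 2
  else if my.contains (m + k * xd, n + k * yd) then 1 else 0

-- the window test `line[p:p+len(w)] == w`
def winMatch (line w : List Int) (p : Int) : Bool :=
  PySem.List.slice line (some p) (some (p + (w.length : Int))) == w

-- _first_match: leftmost window start 0..5 where the shape w occurs on the line
def firstMatch (line w : List Int) : Option Int :=
  (PySem.List.pyRange 0 6 1).find? (winMatch line w)

-- _points: the 5 stored points for a window starting at p (offset p-5 from (m,n))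
def ptsOf (m n xd yd p : Int) : List (Int × Int) :=
  (PySem.List.pyRange 0 5 1).map (fun j => (m + (j + (p - 5)) * xd, n + (j + (p - 5)) * yd))

def Score_calculation_alt (m : Int) (n : Int) (x_direction : Int) (y_direction : Int) (enemy_list : List (Int × Int)) (my_list : List (Int × Int)) (score_all_arr : List (Int × (List (Int × Int)) × (Int × Int))) : Int :=
  if score_all_arr.any (fun item => item.2.1.any (fun pt =>
       m == pt.1 && n == pt.2 && x_direction == item.2.2.1 && y_direction == item.2.2.2)) then 0
  else
    let line := (PySem.List.pyRange (-5) 6 1).map (bCell m n x_direction y_direction enemy_list my_list)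
    let candidates := sevalList.foldl (fun cs sc =>
      match firstMatch line sc.2 with
      | some p => cs ++ [(sc.1, p)]
      | none => cs) ([] : List (Int × Int))
    match candidates with
    | [] => 0
    | _ :: _ =>
      let bestScore := (PySem.List.max? (candidates.map (fun c => c.1)) (fun x => x)).getD 0
      let bestP := (PySem.List.min? ((candidates.filter (fun c => c.1 == bestScore)).map (fun c => c.2)) (fun x => x)).getD 0
      let pts := ptsOf m n x_direction y_direction bestP
      let add_score :=
        if bestScore > 10 then
          score_all_arr.foldl (fun acc item =>
            if item.1 > 10 then
              item.2.1.foldl (fun acc pt1 =>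
                acc + (item.1 + bestScore) * (PySem.List.count pts pt1 : Int)) acc
            else acc) 0
        else 0
      add_score + bestScore

-- ===== PRECONDITION & SPEC =====
def Spec_Score_calculation (m : Int) (n : Int) (x_direction : Int) (y_direction : Int) (enemy_list : List (Int × Int)) (my_list : List (Int × Int)) (score_all_arr : List (Int × (List (Int × Int)) × (Int × Int))) (out : Int) : Prop := out = Score_calculation_alt m n x_direction y_direction enemy_list my_list score_all_arr
instance (m : Int) (n : Int) (x_direction : Int) (y_direction : Int) (enemy_list : List (Int × Int)) (my_list : List (Int × Int)) (score_all_arr : List (Int × (List (Int × Int)) × (Int × Int))) (out : Int) : Decidable (Spec_Score_calculation m n x_direction y_direction enemy_list my_list score_all_arr out) := by unfold Spec_Score_calculation; infer_instance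

-- ===== CLAIM (what is proved, stated in full; the proofs are below) =====
def Claim_equal_Score_calculation : Prop := ∀ (m : Int) (n : Int) (x_direction : Int) (y_direction : Int) (enemy_list : List (Int × Int)) (my_list : List (Int × Int)) (score_all_arr : List (Int × (List (Int × Int)) × (Int × Int))), Dom_Score_calculation m n x_direction y_direction enemy_list my_list score_all_arr → Spec_Score_calculation m n x_direction y_direction enemy_list my_list score_all_arr (Score_calculation m n x_direction y_direction enemy_list my_list score_all_arr)

-- ===== LEMMAS AND PROOFS =====

-- the line of cell codes (exactly port B's `line` term)
def pvLine (m n xd yd : Int) (enemy my : List (Int × Int)) : List Int :=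
  (PySem.List.pyRange (-5) 6 1).map (bCell m n xd yd enemy my)

-- per-window best matched score (0 when nothing matches)
def pvW (line : List Int) (p : Int) : Int :=
  sevalList.foldl (fun a sc => if winMatch line sc.2 p then max a sc.1 else a) 0

-- B's candidate list as a filterMap
def pvCands (line : List Int) : List (Int × Int) :=
  sevalList.foldl (fun cs sc =>
    match firstMatch line sc.2 with
    | some p => cs ++ [(sc.1, p)]
    | none => cs) ([] : List (Int × Int))

-- ---- generic facts about the conditional-max fold ----

lemma vfold_le {α : Type} (c : α → Bool) (f : α → Int) :
    ∀ (S : List α) (a : Int), a ≤ S.foldl (fun x sc => if c sc then max x (f sc) else x) a := by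
  intro S
  induction S with
  | nil => intro a; exact le_refl a
  | cons sc S ih =>
    intro a
    refine le_trans ?_ (ih (if c sc then max a (f sc) else a))
    split
    · exact le_max_left _ _
    · exact le_refl a

lemma vfold_shift {α : Type} (c : α → Bool) (f : α → Int) :
    ∀ (S : List α) (a b : Int),
      S.foldl (fun x sc => if c sc then max x (f sc) else x) (max a b)
        = max a (S.foldl (fun x sc => if c sc then max x (f sc) else x) b) := by
  intro S
  induction S with
  | nil => intro a b; rfl
  | cons sc S ih =>
    intro a b
    simp only [List.foldl_cons]
    by_cases h : c sc = true
    · simp only [h, if_true, max_assoc, ih]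
    · simp only [h]
      exact ih a b

lemma vfold_mem {α : Type} (c : α → Bool) (f : α → Int) :
    ∀ (S : List α) (a : Int),
      S.foldl (fun x sc => if c sc then max x (f sc) else x) a = a ∨
        ∃ sc ∈ S, c sc ∧ S.foldl (fun x sc => if c sc then max x (f sc) else x) a = f sc := by
  intro S
  induction S with
  | nil => intro a; exact Or.inl rfl
  | cons sc S ih =>
    intro a
    simp only [List.foldl_cons]
    by_cases h : c sc = true
    · simp only [h, if_true]
      rcases ih (max a (f sc)) with h1 | ⟨sc', hmem, hc, hv⟩
      · rcases max_choice a (f sc) with hm | hm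
        · exact Or.inl (h1.trans hm)
        · exact Or.inr ⟨sc, List.mem_cons_self, h, h1.trans hm⟩
      · exact Or.inr ⟨sc', List.mem_cons_of_mem _ hmem, hc, hv⟩
    · simp only [h]
      rcases ih a with h1 | ⟨sc', hmem, hc, hv⟩
      · exact Or.inl h1
      · exact Or.inr ⟨sc', List.mem_cons_of_mem _ hmem, hc, hv⟩

lemma vfold_ge_mem {α : Type} (c : α → Bool) (f : α → Int) :
    ∀ (S : List α) (a : Int) (sc : α), sc ∈ S → c sc = true →
      f sc ≤ S.foldl (fun x sc => if c sc then max x (f sc) else x) a := by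
  intro S
  induction S with
  | nil => intro a sc h; exact absurd h (List.not_mem_nil)
  | cons sc0 S ih =>
    intro a sc hmem hc
    simp only [List.foldl_cons]
    rcases List.mem_cons.mp hmem with rfl | hmem'
    · refine le_trans ?_ (vfold_le c f S _)
      simp [hc]
    · exact ih _ sc hmem' hc

-- ---- the strict-greater running update, characterized ----

-- inner pattern loop: state update with a constant payload
lemma innerfold_eq {α X : Type} (c : α → Bool) (f : α → Int) (x : X) :
    ∀ (S : List α) (st : Int × Option X),
      S.foldl (fun st sc => if c sc && f sc > st.1 then (f sc, some x) else st) st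
        = (S.foldl (fun a sc => if c sc then max a (f sc) else a) st.1,
           if st.1 < S.foldl (fun a sc => if c sc then max a (f sc) else a) st.1
           then some x else st.2) := by
  intro S
  induction S with
  | nil =>
    intro st
    simp only [List.foldl_nil, lt_irrefl, if_false]
  | cons sc S ih =>
    intro st
    simp only [List.foldl_cons]
    by_cases hc : c sc = true
    · by_cases hgt : f sc > st.1
      · have h1 : (if c sc && f sc > st.1 then (f sc, some x) else st) = (f sc, some x) := by
          simp [hc, hgt]
        have h2 : (if c sc = true then max st.1 (f sc) else st.1) = f sc := by
          simp [hc, max_eq_right hgt.le]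
        rw [h1]
        simp only [h2]
        rw [ih (f sc, some x)]
        have hle : f sc ≤ S.foldl (fun a sc => if c sc then max a (f sc) else a) (f sc) :=
          vfold_le c f S (f sc)
        have hst : st.1 < S.foldl (fun a sc => if c sc then max a (f sc) else a) (f sc) :=
          lt_of_lt_of_le hgt hle
        simp only [Prod.mk.injEq, true_and]
        rw [if_pos hst]
        split <;> rfl
      · have h1 : (if c sc && f sc > st.1 then (f sc, some x) else st) = st := by
          simp [hc, hgt]
        have h2 : (if c sc = true then max st.1 (f sc) else st.1) = st.1 := by
          simp [hc, max_eq_left (not_lt.mp hgt)]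
        rw [h1]
        simp only [h2]
        exact ih st
    · have h1 : (if c sc && f sc > st.1 then (f sc, some x) else st) = st := by simp [hc]
      have h2 : (if c sc = true then max st.1 (f sc) else st.1) = st.1 := by simp [hc]
      rw [h1]
      simp only [h2]
      exact ih st

-- outer position loop: running strict max with per-position payload,
-- = (overall max, payload of the first position attaining it)
lemma argfold_char {X : Type} (w : Int → Int) (g : Int → X) :
    ∀ (ps : List Int) (st : Int × Option X),
      ps.foldl (fun st p => if w p > st.1 then (w p, some (g p)) else st) st
        = ((ps.map w).foldl max st.1,
           if st.1 < (ps.map w).foldl max st.1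
           then (ps.find? (fun p => w p == (ps.map w).foldl max st.1)).map g else st.2) := by
  intro ps
  induction ps with
  | nil =>
    intro st
    simp only [List.map_nil, List.foldl_nil, List.find?_nil, lt_irrefl, if_false]
  | cons p t ih =>
    intro st
    simp only [List.map_cons, List.foldl_cons]
    by_cases h : w p > st.1
    · have h1 : (if w p > st.1 then (w p, some (g p)) else st) = (w p, some (g p)) := by simp [h]
      have h2 : max st.1 (w p) = w p := max_eq_right h.le
      rw [h1]
      simp only [h2]
      rw [ih (w p, some (g p))]
      have hle : w p ≤ (t.map w).foldl max (w p) := (PySem.List.le_foldl_max _ _).1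
      have hstlt : st.1 < (t.map w).foldl max (w p) := lt_of_lt_of_le h hle
      rw [if_pos hstlt]
      simp only [Prod.mk.injEq, true_and]
      by_cases hR : w p = (t.map w).foldl max (w p)
      · have hfind : (p :: t).find? (fun q => w q == (t.map w).foldl max (w p)) = some p :=
          List.find?_cons_of_pos (by simp [← hR])
        rw [hfind]
        have hnlt : ¬ (w p < (t.map w).foldl max (w p)) := by rw [← hR]; exact lt_irrefl _
        simp [hnlt]
      · have hlt : w p < (t.map w).foldl max (w p) := lt_of_le_of_ne hle hR
        have hfind : (p :: t).find? (fun q => w q == (t.map w).foldl max (w p))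
            = t.find? (fun q => w q == (t.map w).foldl max (w p)) :=
          List.find?_cons_of_neg (by simp [hR])
        rw [hfind, if_pos hlt]
    · have h1 : (if w p > st.1 then (w p, some (g p)) else st) = st := by simp [h]
      have h2 : max st.1 (w p) = st.1 := max_eq_left (not_lt.mp h)
      rw [h1]
      simp only [h2]
      rw [ih st]
      by_cases hlt : st.1 < (t.map w).foldl max st.1
      · have hne : w p ≠ (t.map w).foldl max st.1 := by
          intro hEq
          rw [← hEq] at hlt
          exact absurd hlt (not_lt.mpr (not_lt.mp h))
        have hfind : (p :: t).find? (fun q => w q == (t.map w).foldl max st.1)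
            = t.find? (fun q => w q == (t.map w).foldl max st.1) :=
          List.find?_cons_of_neg (by simp [hne])
        rw [hfind]
      · rw [if_neg hlt, if_neg hlt]

-- find? on a strictly increasing list returns the least satisfying element
lemma find?_min_of_pairwise {ps : List Int} (hp : ps.Pairwise (· < ·)) {q : Int → Bool} {x : Int}
    (h : ps.find? q = some x) : ∀ y ∈ ps, q y = true → x ≤ y := by
  induction ps with
  | nil => simp at h
  | cons a t ih =>
    rcases List.pairwise_cons.mp hp with ⟨ha, ht⟩
    intro y hy hqy
    by_cases hqa : q a = true
    · rw [List.find?_cons_of_pos hqa] at h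
      injection h with h; subst h
      rcases List.mem_cons.mp hy with rfl | hy'
      · exact le_refl y
      · exact (ha y hy').le
    · rw [List.find?_cons_of_neg hqa] at h
      rcases List.mem_cons.mp hy with rfl | hy'
      · exact absurd hqy hqa
      · exact ih ht h y hy' hqy

-- ---- A-side normalization ----

-- A's per-offset step, rewritten over the line of codes
set_option maxHeartbeats 4000000 in
lemma stepA_eq (m n xd yd : Int) (enemy my : List (Int × Int)) (o : Int)
    (ho : o ∈ PySem.List.pyRange (-5) 1 1) (st : Int × Option (List (Int × Int))) :
    stepA m n xd yd enemy my st o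
      = sevalList.foldl
          (fun st sc => if winMatch (pvLine m n xd yd enemy my) sc.2 (o + 5) && sc.1 > st.1
                        then (sc.1, some (ptsOf m n xd yd (o + 5))) else st) st := by
  rw [show PySem.List.pyRange (-5) 1 1 = [-5, -4, -3, -2, -1, 0] from by decide] at ho
  fin_cases ho <;>
  · refine PySem.List.foldl_congr_mem _ _ _ _ ?_
    intro acc sc hsc
    fin_cases hsc <;>
      norm_num [stepA, winMatch, pvLine, ptsOf, bCell, PySem.List.slice_toNat,
        show ((0 : Int)).toNat = 0 from rfl, show ((1 : Int)).toNat = 1 from rfl, show ((2 : Int)).toNat = 2 from rfl, show ((3 : Int)).toNat = 3 from rfl, show ((4 : Int)).toNat = 4 from rfl, show ((5 : Int)).toNat = 5 from rfl, show ((6 : Int)).toNat = 6 from rfl, show ((7 : Int)).toNat = 7 from rfl, show ((8 : Int)).toNat = 8 from rfl, show ((9 : Int)).toNat = 9 from rfl, show ((10 : Int)).toNat = 10 from rfl, show ((11 : Int)).toNat = 11 from rfl,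
        show PySem.List.pyRange 0 6 1 = [0, 1, 2, 3, 4, 5] from by decide,
        show PySem.List.pyRange (-5) 6 1 = [-5, -4, -3, -2, -1, 0, 1, 2, 3, 4, 5] from by decide,
        show PySem.List.pyRange 0 5 1 = [0, 1, 2, 3, 4] from by decide,
        List.foldl_cons, List.foldl_nil, List.map_cons, List.map_nil,
        List.nil_append, List.cons_append, List.take_succ_cons, List.take_zero]

-- the whole offset loop, as the position loop of running strict max over pvW
lemma afold_eq (m n xd yd : Int) (enemy my : List (Int × Int)) :
    (PySem.List.pyRange (-5) 1 1).foldl (stepA m n xd yd enemy my) ((0 : Int), none)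
      = (PySem.List.pyRange 0 6 1).foldl
          (fun st p => if pvW (pvLine m n xd yd enemy my) p > st.1
                       then (pvW (pvLine m n xd yd enemy my) p, some (ptsOf m n xd yd p)) else st)
          ((0 : Int), none) := by
  rw [PySem.List.foldl_congr_mem _ _ _ _ (fun st o ho => stepA_eq m n xd yd enemy my o ho st)]
  have hps : ∀ (os : List Int) (st : Int × Option (List (Int × Int))), 0 ≤ st.1 →
      os.foldl (fun st o => sevalList.foldl
          (fun st sc => if winMatch (pvLine m n xd yd enemy my) sc.2 (o + 5) && sc.1 > st.1
                        then (sc.1, some (ptsOf m n xd yd (o + 5))) else st) st) st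
        = os.foldl (fun st o => if pvW (pvLine m n xd yd enemy my) (o + 5) > st.1
            then (pvW (pvLine m n xd yd enemy my) (o + 5), some (ptsOf m n xd yd (o + 5))) else st) st := by
    intro os
    induction os with
    | nil => intro st h; rfl
    | cons o t ih =>
      intro st hst
      simp only [List.foldl_cons]
      rw [innerfold_eq (fun sc => winMatch (pvLine m n xd yd enemy my) sc.2 (o + 5))
            (fun sc => sc.1) (ptsOf m n xd yd (o + 5)) sevalList st]
      have hshift : sevalList.foldl
          (fun a sc => if winMatch (pvLine m n xd yd enemy my) sc.2 (o + 5) then max a sc.1 else a) st.1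
          = max st.1 (pvW (pvLine m n xd yd enemy my) (o + 5)) := by
        have h0 : st.1 = max st.1 0 := (max_eq_left hst).symm
        rw [pvW]
        conv_lhs => rw [h0]
        exact vfold_shift _ _ sevalList st.1 0
      rw [hshift]
      by_cases h : pvW (pvLine m n xd yd enemy my) (o + 5) > st.1
      · have h2 : max st.1 (pvW (pvLine m n xd yd enemy my) (o + 5))
            = pvW (pvLine m n xd yd enemy my) (o + 5) := max_eq_right h.le
        rw [h2, if_pos h, if_pos h]
        exact ih _ (le_trans hst h.le)
      · have h2 : max st.1 (pvW (pvLine m n xd yd enemy my) (o + 5)) = st.1 :=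
          max_eq_left (not_lt.mp h)
        rw [h2]
        simp only [lt_irrefl, if_false, if_neg h]
        exact ih st hst
  rw [hps _ _ (le_refl 0)]
  rw [show PySem.List.pyRange (-5) 1 1 = [-5, -4, -3, -2, -1, 0] from by decide,
      show PySem.List.pyRange 0 6 1 = [0, 1, 2, 3, 4, 5] from by decide]
  norm_num

-- ---- B-side normalization ----

lemma cands_eq (line : List Int) :
    pvCands line = sevalList.filterMap (fun sc => (firstMatch line sc.2).map (fun p => (sc.1, p))) := by
  have h : ∀ (S : List (Int × List Int)) (cs : List (Int × Int)),
      S.foldl (fun cs sc =>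
          match firstMatch line sc.2 with
          | some p => cs ++ [(sc.1, p)]
          | none => cs) cs
        = cs ++ S.filterMap (fun sc => (firstMatch line sc.2).map (fun p => (sc.1, p))) := by
    intro S
    induction S with
    | nil => intro cs; simp
    | cons sc S ih =>
      intro cs
      simp only [List.foldl_cons, List.filterMap_cons]
      cases hfm : firstMatch line sc.2 with
      | none => simp [ih]
      | some p => simp [ih, List.append_assoc]
  exact h sevalList []

lemma mem_cands (line : List Int) (s p : Int) :
    (s, p) ∈ pvCands line ↔ ∃ sc ∈ sevalList, sc.1 = s ∧ firstMatch line sc.2 = some p := by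
  rw [cands_eq]
  simp only [List.mem_filterMap, Option.map_eq_some_iff]
  constructor
  · rintro ⟨sc, hmem, q, hq, hpair⟩
    exact ⟨sc, hmem, (Prod.mk.injEq _ _ _ _).mp hpair |>.1, by
      rw [hq]; congr 1; exact ((Prod.mk.injEq _ _ _ _).mp hpair).2⟩
  · rintro ⟨sc, hmem, hs, hfm⟩
    exact ⟨sc, hmem, p, hfm, by rw [hs]⟩

-- ---- facts connecting pvW, firstMatch and candidates ----

lemma sevalList_pos : ∀ sc ∈ sevalList, (0 : Int) < sc.1 := by decide

lemma pvW_le (line : List Int) (p : Int) (sc : Int × List Int) (hmem : sc ∈ sevalList)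
    (hc : winMatch line sc.2 p = true) : sc.1 ≤ pvW line p :=
  vfold_ge_mem _ _ sevalList 0 sc hmem hc

lemma pvW_attained (line : List Int) (p : Int) (h : 0 < pvW line p) :
    ∃ sc ∈ sevalList, winMatch line sc.2 p = true ∧ sc.1 = pvW line p := by
  rcases vfold_mem (fun sc => winMatch line sc.2 p) (fun sc : Int × List Int => sc.1) sevalList 0 with
    h0 | ⟨sc, hmem, hc, hv⟩
  · rw [pvW] at h; rw [h0] at h; exact absurd h (lt_irrefl 0)
  · exact ⟨sc, hmem, hc, hv.symm⟩

-- firstMatch returns the least matching start in 0..5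
lemma firstMatch_spec (line w : List Int) (p : Int) (h : firstMatch line w = some p) :
    winMatch line w p = true ∧ p ∈ PySem.List.pyRange 0 6 1 ∧
      ∀ q ∈ PySem.List.pyRange 0 6 1, winMatch line w q = true → p ≤ q := by
  refine ⟨List.find?_some h, List.mem_of_find?_eq_some h, ?_⟩
  exact find?_min_of_pairwise (PySem.List.pairwise_lt_pyRange_one 0 6) h

lemma firstMatch_isSome (line w : List Int) (p : Int) (hp : p ∈ PySem.List.pyRange 0 6 1)
    (hc : winMatch line w p = true) : ∃ q, firstMatch line w = some q := by
  have : (firstMatch line w).isSome = true := List.find?_isSome.mpr ⟨p, hp, hc⟩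
  exact Option.isSome_iff_exists.mp this

-- ---- the bonus loops ----

lemma count_fold (pts : List (Int × Int)) (c : Int) :
    ∀ (acc : Int) (pt1 : Int × Int),
      pts.foldl (fun a pt2 => if pt1 == pt2 then a + c else a) acc
        = acc + c * (PySem.List.count pts pt1 : Int) := by
  induction pts with
  | nil => intro acc pt1; simp [PySem.List.count_eq]
  | cons p t ih =>
    intro acc pt1
    simp only [List.foldl_cons, PySem.List.count_eq, List.count_cons] at *
    by_cases h : pt1 = p
    · subst h
      rw [if_pos (by simp), ih]
      simp only [BEq.rfl, if_true]
      push_cast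
      ring
    · rw [if_neg (by simp [h]), ih]
      have : (p == pt1) = false := by simp [Ne.symm h]
      simp [this]

lemma bonus_eq (s : Int) (pts : List (Int × Int)) (arr : List (Int × (List (Int × Int)) × (Int × Int))) :
    arr.foldl (fun acc item =>
      item.2.1.foldl (fun acc pt1 =>
        pts.foldl (fun acc pt2 =>
          if pt1 == pt2 && s > 10 && item.1 > 10 then acc + item.1 + s else acc) acc) acc) 0
    = (if s > 10 then
        arr.foldl (fun acc item =>
          if item.1 > 10 then
            item.2.1.foldl (fun acc pt1 =>
              acc + (item.1 + s) * (PySem.List.count pts pt1 : Int)) acc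
          else acc) 0
      else 0) := by
  have hidpts : ∀ (item : Int × (List (Int × Int)) × (Int × Int)), ¬(item.1 > 10 ∧ s > 10) →
      ∀ (acc : Int) (pt1 : Int × Int),
      pts.foldl (fun acc pt2 =>
        if pt1 == pt2 && s > 10 && item.1 > 10 then acc + item.1 + s else acc) acc = acc := by
    intro item h acc pt1
    induction pts generalizing acc with
    | nil => rfl
    | cons p ps ihp =>
      rcases Decidable.not_and_iff_not_or_not.mp h with h1 | h1 <;>
        simp [List.foldl_cons, h1]
  have hiditem : ∀ (item : Int × (List (Int × Int)) × (Int × Int)), ¬(item.1 > 10 ∧ s > 10) →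
      ∀ (acc : Int),
      item.2.1.foldl (fun acc pt1 =>
        pts.foldl (fun acc pt2 =>
          if pt1 == pt2 && s > 10 && item.1 > 10 then acc + item.1 + s else acc) acc) acc = acc := by
    intro item h acc
    induction item.2.1 generalizing acc with
    | nil => rfl
    | cons p ps ihp => rw [List.foldl_cons, hidpts item h, ihp]
  by_cases hs : s > 10
  · rw [if_pos hs]
    refine List.foldl_ext _ _ 0 (fun acc item _ => ?_)
    by_cases h1 : item.1 > 10
    · rw [if_pos h1]
      refine List.foldl_ext _ _ acc (fun acc2 pt1 _ => ?_)
      have : ∀ a : Int, pts.foldl (fun acc pt2 =>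
          if pt1 == pt2 && s > 10 && item.1 > 10 then acc + item.1 + s else acc) a
          = pts.foldl (fun acc pt2 => if pt1 == pt2 then acc + (item.1 + s) else acc) a := by
        intro a
        refine List.foldl_ext _ _ a (fun a2 pt2 _ => ?_)
        by_cases he : pt1 == pt2
        · simp [he, hs, h1, add_assoc]
        · simp [he]
      rw [this, count_fold]
    · rw [if_neg h1, hiditem item (by tauto)]
  · rw [if_neg hs]
    rw [List.foldl_ext _ (fun (acc : Int) _ => acc) 0 (fun acc item _ => hiditem item (by tauto) acc)]
    exact List.foldl_fixed _

-- running max over a list: the result is the start or a member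
lemma foldl_max_mem : ∀ (l : List Int) (a : Int), l.foldl max a = a ∨ l.foldl max a ∈ l := by
  intro l
  induction l with
  | nil => intro a; exact Or.inl rfl
  | cons x t ih =>
    intro a
    simp only [List.foldl_cons]
    rcases ih (max a x) with h | h
    · rcases max_choice a x with hm | hm
      · exact Or.inl (h.trans hm)
      · exact Or.inr (List.mem_cons.mpr (Or.inl (h.trans hm)))
    · exact Or.inr (List.mem_cons_of_mem _ h)

-- ===== VERDICT (by name: the statement is the Claim_ definition above) =====
theorem Score_calculation_spec : Claim_equal_Score_calculation := by
  intro m n xd yd enemy my arr _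
  unfold Spec_Score_calculation Score_calculation Score_calculation_alt
  by_cases hg : (arr.any (fun item => item.2.1.any (fun pt =>
      m == pt.1 && n == pt.2 && xd == item.2.2.1 && yd == item.2.2.2))) = true
  · rw [if_pos hg, if_pos hg]
  · rw [if_neg hg, if_neg hg]
    dsimp only
    have hlfold : (PySem.List.pyRange (-5) 6 1).map (bCell m n xd yd enemy my)
        = pvLine m n xd yd enemy my := rfl
    rw [hlfold]
    set line := pvLine m n xd yd enemy my with hline
    have hcfold : (sevalList.foldl (fun cs sc =>
        match firstMatch line sc.2 with
        | some p => cs ++ [(sc.1, p)]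
        | none => cs) ([] : List (Int × Int))) = pvCands line := rfl
    rw [hcfold]
    rw [afold_eq m n xd yd enemy my]
    rw [argfold_char (pvW line) (ptsOf m n xd yd) (PySem.List.pyRange 0 6 1) ((0 : Int), none)]
    set M := ((PySem.List.pyRange 0 6 1).map (pvW line)).foldl max 0 with hM
    have hM0 : 0 ≤ M := (PySem.List.le_foldl_max _ _).1
    have hWleM : ∀ p ∈ PySem.List.pyRange 0 6 1, pvW line p ≤ M := by
      intro p hp
      exact (PySem.List.le_foldl_max _ _).2 (pvW line p) (List.mem_map_of_mem hp)
    have hcand_le : ∀ s p, (s, p) ∈ pvCands line → s ≤ M := by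
      intro s p hmem
      rcases (mem_cands line s p).mp hmem with ⟨sc, hsc, hs, hfm⟩
      rcases firstMatch_spec line sc.2 p hfm with ⟨hwm, hpmem, _⟩
      calc s = sc.1 := hs.symm
        _ ≤ pvW line p := pvW_le line p sc hsc hwm
        _ ≤ M := hWleM p hpmem
    -- every candidate with score M sits at a position whose window value is M
    have hcandM : ∀ p, (M, p) ∈ pvCands line → pvW line p = M ∧ p ∈ PySem.List.pyRange 0 6 1 := by
      intro p hmem
      rcases (mem_cands line M p).mp hmem with ⟨sc, hsc, hs, hfm⟩
      rcases firstMatch_spec line sc.2 p hfm with ⟨hwm, hpmem, _⟩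
      refine ⟨le_antisymm (hWleM p hpmem) ?_, hpmem⟩
      calc M = sc.1 := hs.symm
        _ ≤ pvW line p := pvW_le line p sc hsc hwm
    by_cases hMpos : 0 < M
    · -- A found a shape; let p₀ be the first position attaining M
      rw [if_pos hMpos]
      have hMmem : ∃ p ∈ PySem.List.pyRange 0 6 1, pvW line p = M := by
        rcases foldl_max_mem ((PySem.List.pyRange 0 6 1).map (pvW line)) 0 with h0 | h0
        · rw [← hM] at h0; omega
        · rcases List.mem_map.mp (hM ▸ h0) with ⟨p, hp, hpv⟩
          exact ⟨p, hp, hpv⟩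
      have hfsome : ∃ p₀, (PySem.List.pyRange 0 6 1).find? (fun p => pvW line p == M) = some p₀ := by
        rcases hMmem with ⟨p, hp, hpv⟩
        exact Option.isSome_iff_exists.mp (List.find?_isSome.mpr ⟨p, hp, by simp [hpv]⟩)
      rcases hfsome with ⟨p₀, hfind⟩
      have hp₀w : pvW line p₀ = M := by
        have := List.find?_some hfind
        simpa using this
      have hp₀mem : p₀ ∈ PySem.List.pyRange 0 6 1 := List.mem_of_find?_eq_some hfind
      have hp₀min : ∀ q ∈ PySem.List.pyRange 0 6 1, pvW line q = M → p₀ ≤ q := by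
        intro q hq hqv
        exact find?_min_of_pairwise (PySem.List.pairwise_lt_pyRange_one 0 6) hfind q hq (by simp [hqv])
      -- the candidate (M, p₀) exists
      have hcand0 : (M, p₀) ∈ pvCands line := by
        rcases pvW_attained line p₀ (hp₀w ▸ hMpos) with ⟨sc₀, hsc₀, hwm₀, hv₀⟩
        have hsc₀M : sc₀.1 = M := by rw [hv₀, hp₀w]
        rcases firstMatch_isSome line sc₀.2 p₀ hp₀mem hwm₀ with ⟨lm, hfm⟩
        rcases firstMatch_spec line sc₀.2 lm hfm with ⟨hwmlm, hlmmem, hlmmin⟩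
        have hlm_le : lm ≤ p₀ := hlmmin p₀ hp₀mem hwm₀
        have hwlm : pvW line lm = M :=
          le_antisymm (hWleM lm hlmmem)
            (by calc M = sc₀.1 := hsc₀M.symm
                  _ ≤ pvW line lm := pvW_le line lm sc₀ hsc₀ hwmlm)
        have : p₀ ≤ lm := hp₀min lm hlmmem hwlm
        have hlm : lm = p₀ := le_antisymm hlm_le this
        exact (mem_cands line M p₀).mpr ⟨sc₀, hsc₀, hsc₀M, hlm ▸ hfm⟩
      rw [hfind]
      cases hc : pvCands line with
      | nil => rw [hc] at hcand0; exact absurd hcand0 (List.not_mem_nil)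
      | cons c cs =>
        have hbs : (PySem.List.max? ((c :: cs).map (fun c => c.1)) (fun x => x)).getD 0 = M := by
          cases hmax : PySem.List.max? ((c :: cs).map (fun c => c.1)) (fun x => x) with
          | none =>
            have := (PySem.List.max?_eq_none_iff _ _).mp hmax
            simp at this
          | some v =>
            have hvmem := PySem.List.max?_mem hmax
            rcases List.mem_map.mp hvmem with ⟨cand, hcmem, hcv⟩
            have hvle : v ≤ M := by
              have : (cand.1, cand.2) ∈ pvCands line := by rw [hc]; simpa using hcmem
              rw [← hcv]
              exact hcand_le cand.1 cand.2 this
            have hMle : M ≤ v := by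
              have hMmem' : M ∈ (c :: cs).map (fun c => c.1) := by
                rw [← hc]
                exact List.mem_map.mpr ⟨(M, p₀), hcand0, rfl⟩
              exact PySem.List.max?_isMax hmax M hMmem'
            simp [le_antisymm hvle hMle]
        rw [hbs]
        have hp₀l2 : p₀ ∈ ((c :: cs).filter (fun c => c.1 == M)).map (fun c => c.2) := by
          refine List.mem_map.mpr ⟨(M, p₀), ?_, rfl⟩
          refine List.mem_filter.mpr ⟨by rw [← hc]; exact hcand0, by simp⟩
        have hbp : (PySem.List.min? (((c :: cs).filter (fun c => c.1 == M)).map (fun c => c.2)) (fun x => x)).getD 0 = p₀ := by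
          cases hmin : PySem.List.min? (((c :: cs).filter (fun c => c.1 == M)).map (fun c => c.2)) (fun x => x) with
          | none =>
            have := (PySem.List.min?_eq_none_iff _ _).mp hmin
            rw [this] at hp₀l2
            exact absurd hp₀l2 (List.not_mem_nil)
          | some u =>
            have humem := PySem.List.min?_mem hmin
            rcases List.mem_map.mp humem with ⟨cand, hcmem, hcu⟩
            have hcM : cand.1 = M := by
              have := (List.mem_filter.mp hcmem).2
              simpa using this
            have hcands : (M, cand.2) ∈ pvCands line := by
              rw [hc]
              have : (cand.1, cand.2) = cand := rfl
              rw [← hcM] at hcmem ⊢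
              simpa using (List.mem_filter.mp hcmem).1
            have hwc := hcandM cand.2 hcands
            have hple : p₀ ≤ u := hcu ▸ hp₀min cand.2 hwc.2 hwc.1
            have hule : u ≤ p₀ := PySem.List.min?_isMin hmin p₀ hp₀l2
            simp [le_antisymm hule hple]
        rw [hbp]
        simp only [Option.map_some]
        rw [bonus_eq M (ptsOf m n xd yd p₀) arr]
    · -- nothing matched: M = 0 and there are no candidates
      rw [if_neg hMpos]
      have hMz : M = 0 := by omega
      have hcnil : pvCands line = [] := by
        cases hc : pvCands line with
        | nil => rfl
        | cons c cs =>
          exfalso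
          have hcmem : (c.1, c.2) ∈ pvCands line := by rw [hc]; simp
          rcases (mem_cands line c.1 c.2).mp hcmem with ⟨sc, hsc, hs, _⟩
          have hpos := sevalList_pos sc hsc
          have := hcand_le c.1 c.2 hcmem
          omega
      rw [hcnil]
      simp [hMz]
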